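-- pv_equiv track=rewrite | github.com/temur-kh/distributed-system-project | client_side/client.py | line_split
-- ===== SOURCE A (Python) =====
-- def line_split(line):
--     line = line + ' '
--     t = False
--     res = []
--     word = ''
--     for i in line:
--         if (i == '\"'):
--             t = not t
--             continue
--         if (i == ' ' and t) or (i != ' '):
--             word = word + i
--         elif i == ' ':
--             res.append(word)
--             word = ''
--     return res
-- ===== SOURCE B (Python) =====
-- def line_split(line):
--     res = []
--     word = ''
--     inside = False
--     for seg in (line + ' ').split('"'):
--         if inside:
--             word += seg
--         else:
--             pieces = seg.split(' ')
--             word += pieces[0]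
--             for p in pieces[1:]:
--                 res.append(word)
--                 word = p
--         inside = not inside
--     return res
-- ===== Notes on version B (the rewrite author's own statement) =====
-- stated objective: alternative
-- what changed: A scans the line character by character with a quote-toggle flag; B splits the appended line once on the double-quote character into alternating outside/inside segments and then splits only the outside segments on the space character, gluing pieces across segment boundaries, so the per-character state machine disappears.
import Mathlib
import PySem

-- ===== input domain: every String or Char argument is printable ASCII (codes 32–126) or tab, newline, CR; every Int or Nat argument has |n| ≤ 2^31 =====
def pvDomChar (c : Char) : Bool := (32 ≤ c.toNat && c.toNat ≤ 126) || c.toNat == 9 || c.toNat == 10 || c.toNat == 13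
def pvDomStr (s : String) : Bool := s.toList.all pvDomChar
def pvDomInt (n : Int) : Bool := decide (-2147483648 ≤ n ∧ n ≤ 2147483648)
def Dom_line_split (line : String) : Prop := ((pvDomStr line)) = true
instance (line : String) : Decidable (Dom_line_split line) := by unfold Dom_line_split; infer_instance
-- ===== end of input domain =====

-- B replaces A's per-character quote-toggle scan by splitting once on the double-quote character
-- into alternating outside/inside segments and splitting only the outside segments on the space
-- character (objective: alternative).

-- ===== PORT A =====
-- A's loop body: toggle on '"', append the char to word, or flush word to res on an
-- unquoted space.  State = (t, res, word); strings are carried as List Char.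
def stepA (st : Bool × List (List Char) × List Char) (i : Char) :
    Bool × List (List Char) × List Char :=
  if i = '"' then (!st.1, st.2.1, st.2.2)
  else if (i = ' ' ∧ st.1 = true) ∨ i ≠ ' ' then (st.1, st.2.1, st.2.2 ++ [i])
  else (st.1, st.2.1 ++ [st.2.2], [])

def line_split (line : String) : List String :=
  (((line.toList ++ [' ']).foldl stepA (false, [], [])).2.1).map String.ofList

-- ===== PORT B =====
-- inner loop: 'for p in pieces[1:]: res.append(word); word = p'
def innerStepB (rw : List (List Char) × List Char) (p : List Char) :
    List (List Char) × List Char :=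
  (rw.1 ++ [rw.2], p)

-- loop body over the '"'-split segments; pieces[0] is pieces.headD [] (pieces is never empty)
def segStepB (st : Bool × List (List Char) × List Char) (seg : List Char) :
    Bool × List (List Char) × List Char :=
  match st with
  | (inside, res, word) =>
    if inside then (!inside, res, word ++ seg)
    else
      match PySem.Chars.splitOn seg [' '] with   -- pieces; never [] (guard for totality only)
      | [] => (!inside, res, word)
      | p0 :: rest =>                            -- p0 = pieces[0], rest = pieces[1:]
        match rest.foldl innerStepB (res, word ++ p0) with
        | (res', word') => (!inside, res', word')

def line_split_alt (line : String) : List String :=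
  (((PySem.Chars.splitOn (line.toList ++ [' ']) ['"']).foldl segStepB (false, [], [])).2.1).map String.ofList

-- ===== PRECONDITION & SPEC =====
def Spec_line_split (line : String) (out : List String) : Prop := out = line_split_alt line
instance (line : String) (out : List String) : Decidable (Spec_line_split line out) := by unfold Spec_line_split; infer_instance

-- ===== CLAIM (what is proved, stated in full; the proofs are below) =====
def Claim_equal_line_split : Prop := ∀ (line : String), Dom_line_split line → Spec_line_split line (line_split line)

-- ===== LEMMAS AND PROOFS =====

-- Characterisation of PySem.Chars.splitOn for a single-character separator.
def splitOne (q : Char) : List Char → List (List Char)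
  | [] => [[]]
  | c :: rest => if c = q then [] :: splitOne q rest
                 else (splitOne q rest).modifyHead (c :: ·)

theorem splitOne_ne_nil (q : Char) (l : List Char) : splitOne q l ≠ [] := by
  cases l with
  | nil => simp [splitOne]
  | cons c rest =>
    simp only [splitOne]
    split_ifs
    · simp
    · have := splitOne_ne_nil q rest
      cases h : splitOne q rest with
      | nil => exact absurd h this
      | cons a t => simp [List.modifyHead]

theorem go_eq (q : Char) : ∀ (fuel : Nat) (l : List Char), l.length < fuel →
    ∀ (cur : List Char) (acc : List (List Char)),
    PySem.Chars.splitOn.go [q] fuel l cur acc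
      = acc.reverse ++ (splitOne q l).modifyHead (cur.reverse ++ ·) := by
  intro fuel
  induction fuel with
  | zero => intro l h; omega
  | succ n ih =>
    intro l h cur acc
    cases l with
    | nil => simp [PySem.Chars.splitOn.go, splitOne, List.modifyHead]
    | cons c rest =>
      by_cases hq : q = c
      · subst hq
        have hpre : List.isPrefixOf [q] (q :: rest) = true := by
          simp [List.isPrefixOf]
        have hd : List.drop ([q] : List Char).length (q :: rest) = rest := by simp
        simp only [PySem.Chars.splitOn.go, hpre, if_pos, hd]
        rw [ih rest (by simp at h; omega) [] (cur.reverse :: acc)]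
        simp only [splitOne, List.modifyHead, List.reverse_cons, List.append_assoc,
          List.reverse_nil, List.nil_append, List.cons_append]
        cases splitOne q rest <;> simp
      · have hpre : List.isPrefixOf [q] (c :: rest) = false := by
          simpa [List.isPrefixOf] using hq
        simp only [PySem.Chars.splitOn.go, hpre, Bool.false_eq_true, if_neg, not_false_iff]
        rw [ih rest (by simp at h; omega) (c :: cur) acc]
        have hcq : ¬ (c = q) := fun hc => hq hc.symm
        simp only [splitOne, hcq, if_neg, not_false_iff]
        cases splitOne q rest <;> simp [List.modifyHead]

theorem splitOn_eq_splitOne (q : Char) (l : List Char) :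
    PySem.Chars.splitOn l [q] = splitOne q l := by
  show PySem.Chars.splitOn.go [q] (l.length + 1) l [] [] = splitOne q l
  rw [go_eq q (l.length + 1) l (by omega) [] []]
  cases h : splitOne q l with
  | nil => exact absurd h (splitOne_ne_nil q l)
  | cons a t => simp [List.modifyHead]

theorem splitOne_no_sep (q : Char) (l : List Char) (h : ∀ c ∈ l, c ≠ q) :
    splitOne q l = [l] := by
  induction l with
  | nil => rfl
  | cons c rest ih =>
    have hc : c ≠ q := h c (by simp)
    simp only [splitOne, hc, if_neg, not_false_iff]
    rw [ih (fun c hc => h c (by simp [hc]))]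
    rfl

theorem splitOne_first (q : Char) (p rest : List Char) (h : ∀ c ∈ p, c ≠ q) :
    splitOne q (p ++ q :: rest) = p :: splitOne q rest := by
  induction p with
  | nil => simp [splitOne]
  | cons c p ih =>
    have hc : c ≠ q := h c (by simp)
    simp only [List.cons_append, splitOne, hc, if_neg, not_false_iff]
    rw [ih (fun c hc => h c (by simp [hc]))]
    rfl

-- first-occurrence decomposition
theorem exists_first_quote (cs : List Char) (h : '"' ∈ cs) :
    ∃ p rest, cs = p ++ '"' :: rest ∧ ∀ c ∈ p, c ≠ '"' := by
  induction cs with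
  | nil => cases h
  | cons c cs ih =>
    by_cases hc : c = '"'
    · exact ⟨[], cs, by simp [hc], by simp⟩
    · have hmem : '"' ∈ cs := by
        rcases List.mem_cons.mp h with h1 | h1
        · exact absurd h1.symm hc
        · exact h1
      obtain ⟨p, rest, hsplit, hp⟩ := ih hmem
      exact ⟨c :: p, rest, by simp [hsplit], by
        intro d hd
        rcases List.mem_cons.mp hd with h1 | h1
        · simpa [h1] using hc
        · exact hp d h1⟩

-- reductions of B's segment step
theorem segStepB_inside (res : List (List Char)) (word seg : List Char) :
    segStepB (true, res, word) seg = (false, res, word ++ seg) := by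
  simp [segStepB]

theorem segStepB_outside (res : List (List Char)) (word seg : List Char) :
    segStepB (false, res, word) seg
      = (true, (splitOne ' ' seg).tail.foldl innerStepB (res, word ++ (splitOne ' ' seg).headD [])) := by
  simp only [segStepB, splitOn_eq_splitOne]
  cases hs : splitOne ' ' seg with
  | nil => exact absurd hs (splitOne_ne_nil ' ' seg)
  | cons a tl =>
    simp only [List.tail_cons, List.headD_cons, Bool.not_false]
    obtain ⟨r, w⟩ := tl.foldl innerStepB (res, word ++ a)
    rfl

-- A's loop over a quote-free stretch with t = true: everything is appended to word.
theorem foldA_inside (s : List Char) (h : ∀ c ∈ s, c ≠ '"') :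
    ∀ res word, s.foldl stepA (true, res, word) = (true, res, word ++ s) := by
  induction s with
  | nil => intro res word; simp
  | cons c s ih =>
    intro res word
    have hc : c ≠ '"' := h c (by simp)
    have hstep : stepA (true, res, word) c = (true, res, word ++ [c]) := by
      by_cases hsp : c = ' ' <;> simp [stepA, hc, hsp]
    rw [List.foldl_cons, hstep, ih (fun d hd => h d (by simp [hd]))]
    simp

-- A's loop over a quote-free stretch with t = false equals B's space-split inner fold.
theorem foldA_outside (s : List Char) (h : ∀ c ∈ s, c ≠ '"') :
    ∀ res word, s.foldl stepA (false, res, word)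
      = (false, (splitOne ' ' s).tail.foldl innerStepB (res, word ++ (splitOne ' ' s).headD [])) := by
  induction s with
  | nil => intro res word; simp [splitOne, List.headD]
  | cons c s ih =>
    intro res word
    have hc : c ≠ '"' := h c (by simp)
    by_cases hsp : c = ' '
    · subst hsp
      have hstep : stepA (false, res, word) ' ' = (false, res ++ [word], []) := by
        simp [stepA]
      rw [List.foldl_cons, hstep, ih (fun d hd => h d (by simp [hd]))]
      simp only [splitOne]
      cases hs : splitOne ' ' s with
      | nil => exact absurd hs (splitOne_ne_nil ' ' s)
      | cons a t =>
        simp [List.foldl_cons, innerStepB]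
    · have hstep : stepA (false, res, word) c = (false, res, word ++ [c]) := by
        simp [stepA, hc, hsp]
      rw [List.foldl_cons, hstep, ih (fun d hd => h d (by simp [hd]))]
      simp only [splitOne, hsp, if_neg, not_false_iff]
      cases hs : splitOne ' ' s with
      | nil => exact absurd hs (splitOne_ne_nil ' ' s)
      | cons a t => simp [List.modifyHead]

-- Main invariant: A's char fold and B's segment fold agree on (res, word) from any state.
theorem main_inv : ∀ (n : Nat) (cs : List Char), cs.length ≤ n →
    ∀ (t : Bool) (res : List (List Char)) (word : List Char),
    (cs.foldl stepA (t, res, word)).2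
      = (((PySem.Chars.splitOn cs ['"']).foldl segStepB (t, res, word)).2) := by
  intro n
  induction n with
  | zero =>
    intro cs h t res word
    have : cs = [] := List.eq_nil_of_length_eq_zero (by omega)
    subst this
    rw [splitOn_eq_splitOne]
    cases t with
    | false => rw [splitOne_no_sep '"' [] (by simp), List.foldl_cons, List.foldl_nil,
        segStepB_outside]; simp [splitOne]
    | true => rw [splitOne_no_sep '"' [] (by simp), List.foldl_cons, List.foldl_nil,
        segStepB_inside]; simp
  | succ n ih =>
    intro cs hlen t res word
    by_cases hmem : '"' ∈ cs
    · obtain ⟨p, rest, hsplit, hp⟩ := exists_first_quote cs hmem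
      subst hsplit
      rw [splitOn_eq_splitOne, splitOne_first '"' p rest hp, List.foldl_cons,
        List.foldl_append, List.foldl_cons]
      cases t with
      | false =>
        have h1 : stepA (List.foldl stepA (false, res, word) p) '"'
            = (true, (splitOne ' ' p).tail.foldl innerStepB (res, word ++ (splitOne ' ' p).headD [])) := by
          rw [foldA_outside p hp res word]; simp [stepA]
        rw [h1, segStepB_outside, ← splitOn_eq_splitOne '"' rest]
        exact ih rest (by simp at hlen; omega) true _ _
      | true =>
        have h1 : stepA (List.foldl stepA (true, res, word) p) '"' = (false, res, word ++ p) := by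
          rw [foldA_inside p hp res word]; simp [stepA]
        rw [h1, segStepB_inside, ← splitOn_eq_splitOne '"' rest]
        exact ih rest (by simp at hlen; omega) false _ _
    · have hp : ∀ c ∈ cs, c ≠ '"' := fun c hc he => hmem (he ▸ hc)
      rw [splitOn_eq_splitOne, splitOne_no_sep '"' cs hp, List.foldl_cons, List.foldl_nil]
      cases t with
      | false =>
        rw [foldA_outside cs hp res word, segStepB_outside]
      | true =>
        rw [foldA_inside cs hp res word, segStepB_inside]

-- ===== VERDICT (by name: the statement is the Claim_ definition above) =====
theorem line_split_spec : Claim_equal_line_split := by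
  intro line _
  show line_split line = line_split_alt line
  unfold line_split line_split_alt
  have := main_inv (line.toList ++ [' ']).length (line.toList ++ [' ']) le_rfl false [] []
  rw [show (((line.toList ++ [' ']).foldl stepA (false, [], [])).2.1)
      = (((PySem.Chars.splitOn (line.toList ++ [' ']) ['"']).foldl segStepB (false, [], [])).2.1)
    from congrArg Prod.fst this]
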